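-- pv_equiv track=rewrite | github.com/ikokkari/PythonProblems | labs109.py | partition_point
-- ===== SOURCE A (Python) =====
-- def partition_point(items):
--     n = len(items)
--     n2 = n // 2
--     mins = [0 for _ in range(n)]
--     mins[n - 1] = items[n - 1]
--     for i in range(n - 2, -1, -1):
--         mins[i] = min(items[i], mins[i + 1])
--     big = min(items) - 1
--     best_i = -1
--     for i, e in enumerate(items, 1):
--         big = max(big, e)
--         if i < n - 1 and big <= mins[i] and abs(n2 - i) < abs(n2 - best_i):
--             best_i = i
--     return best_i
-- ===== SOURCE B (Python) =====
-- def partition_point(items):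
--     n = len(items)
--     n2 = n // 2
--     for d in range(n):
--         for i in ([n2] if d == 0 else [n2 - d, n2 + d]):
--             if 1 <= i <= n - 2 and max(items[:i]) <= min(items[i:]):
--                 return i
--     return -1
-- ===== Notes on version B (the rewrite author's own statement) =====
-- stated objective: alternative
-- what changed: A precomputes a suffix-min array and makes one ascending pass with a running prefix max, tracking the best cut; B keeps no arrays and instead searches candidate cut indices outward from the middle (n2, n2-1, n2+1, n2-2, ...), testing each directly with max(items[:i]) <= min(items[i:]) and returning the first valid one, which by the search order is the index nearest n//2 with smaller-index tie-break. (On the empty list, where A raises IndexError and which Pre_ excludes, B naturally returns -1.)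
import Mathlib
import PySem

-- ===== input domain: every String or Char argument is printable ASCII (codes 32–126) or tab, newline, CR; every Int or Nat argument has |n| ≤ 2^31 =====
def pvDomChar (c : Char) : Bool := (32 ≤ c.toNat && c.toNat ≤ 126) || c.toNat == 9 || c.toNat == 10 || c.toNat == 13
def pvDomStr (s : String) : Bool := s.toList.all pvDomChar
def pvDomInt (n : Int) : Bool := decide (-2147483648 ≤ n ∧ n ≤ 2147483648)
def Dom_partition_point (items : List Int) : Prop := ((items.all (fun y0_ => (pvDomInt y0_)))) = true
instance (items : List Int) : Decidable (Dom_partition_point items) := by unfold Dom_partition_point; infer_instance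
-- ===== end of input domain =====

-- B drops A's suffix-min array and running-prefix-max scan entirely: it searches candidate
-- cut indices outward from the middle (n2, n2-1, n2+1, ...) and returns the first index i
-- with max(items[:i]) <= min(items[i:]), checked directly on the slices; same result,
-- different algorithm (no precomputed arrays, middle-out search instead of ascending scan).

-- ===== PORT A =====
def partition_point (items : List Int) : Int :=
  let n : Int := (items.length : Int)
  let n2 : Int := PySem.Int.floordiv n 2
  let mins : List Int := (PySem.List.pyRange 0 n 1).map (fun _ => (0 : Int))
  let mins := PySem.List.pySetD mins (n - 1) (PySem.List.pyGetD items (n - 1) 0)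
  let mins := (PySem.List.pyRange (n - 2) (-1) (-1)).foldl
      (fun s i => PySem.List.pySetD s i
        (min (PySem.List.pyGetD items i 0) (PySem.List.pyGetD s (i + 1) 0))) mins
  let big : Int := (PySem.List.min? items (fun x => x)).getD 0 - 1
  let r := (PySem.List.enumerate items 1).foldl
      (fun (st : Int × Int) p =>
        let big := max st.1 p.2
        let best := if p.1 < n - 1 ∧ big ≤ PySem.List.pyGetD mins p.1 0 ∧
            |n2 - p.1| < |n2 - st.2| then p.1 else st.2
        (big, best)) (big, (-1 : Int))
  r.2

-- ===== PORT B =====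
-- the test '1 <= i <= n - 2 and max(items[:i]) <= min(items[i:])'
def pvAltCheck (items : List Int) (n : Int) (i : Int) : Bool :=
  if 1 ≤ i ∧ i ≤ n - 2 then
    decide ((PySem.List.max? (PySem.List.slice items none (some i)) (fun x => x)).getD 0 ≤
            (PySem.List.min? (PySem.List.slice items (some i) none) (fun x => x)).getD 0)
  else false

-- the 'for d in range(n): for i in (...): if check: return i' loop, over the range list
def pvAltGo (items : List Int) (n n2 : Int) : List Int → Int
  | [] => -1
  | d :: ds =>
    match (if d = 0 then [n2] else [n2 - d, n2 + d]).find? (pvAltCheck items n) with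
    | some i => i
    | none => pvAltGo items n n2 ds

def partition_point_alt (items : List Int) : Int :=
  let n : Int := (items.length : Int)
  let n2 : Int := PySem.Int.floordiv n 2
  pvAltGo items n n2 (PySem.List.pyRange 0 n 1)

-- ===== PRECONDITION & SPEC =====
-- Pre_ excludes only the empty list, on which the Python A raises IndexError (items[n-1] with n = 0).
def Pre_partition_point (items : List Int) : Prop := items ≠ []
instance (items : List Int) : Decidable (Pre_partition_point items) := by
  unfold Pre_partition_point; infer_instance
def pvWitness_partition_point : List Int := [3, 1, 4, 1, 5, 9, 2, 6]

def Spec_partition_point (items : List Int) (out : Int) : Prop := out = partition_point_alt items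
instance (items : List Int) (out : Int) : Decidable (Spec_partition_point items out) := by
  unfold Spec_partition_point; infer_instance

-- ===== CLAIM (what is proved, stated in full; the proofs are below) =====
def Claim_equal_partition_point : Prop := ∀ (items : List Int), Dom_partition_point items →
  Pre_partition_point items → Spec_partition_point items (partition_point items)
-- ===== LEMMAS AND PROOFS =====

-- reading after a write, all indices Int
lemma pvGetD_setD (s : List Int) (i k : Int) (v : Int) (hi : 0 ≤ i) (hil : i < (s.length : Int))
    (hk : 0 ≤ k) :
    PySem.List.pyGetD (PySem.List.pySetD s i v) k 0 = if k = i then v else PySem.List.pyGetD s k 0 := by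
  obtain ⟨m, rfl⟩ : ∃ m : Nat, i = (m : Int) := ⟨i.toNat, (Int.toNat_of_nonneg hi).symm⟩
  obtain ⟨km, rfl⟩ : ∃ m : Nat, k = (m : Int) := ⟨k.toNat, (Int.toNat_of_nonneg hk).symm⟩
  rw [PySem.List.pyGetD_pySetD_natCast s m km v 0 (by exact_mod_cast hil)]
  by_cases h : km = m <;> simp [h]

-- running max of a nonempty list (max(l) with no key)
def pvMX : List Int → Int
  | [] => 0
  | x :: t => t.foldl max x

-- running min of a nonempty list (min(l) with no key)
def pvSM : List Int → Int
  | [] => 0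
  | x :: t => t.foldl min x

-- prefix maxima of items
def pvPM (items : List Int) : Nat → Int
  | 0 => PySem.List.pyGetD items 0 0
  | k + 1 => max (pvPM items k) (PySem.List.pyGetD items ((k : Int) + 1) 0)

-- the value of A's running max 'big' just before processing 0-based element k
def pvBG (items : List Int) : Nat → Int
  | 0 => (PySem.List.min? items (fun x => x)).getD 0 - 1
  | k + 1 => pvPM items k

lemma pvMX_eq_max? (l : List Int) : (PySem.List.max? l (fun x => x)).getD 0 = pvMX l := by
  cases l with
  | nil => rfl
  | cons x t => rw [PySem.List.max?_id_cons]; rfl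

lemma pvSM_eq_min? (l : List Int) : (PySem.List.min? l (fun x => x)).getD 0 = pvSM l := by
  cases l with
  | nil => rfl
  | cons x t => rw [PySem.List.min?_id_cons]; rfl

lemma pvMX_append (l : List Int) (a : Int) (h : l ≠ []) :
    pvMX (l ++ [a]) = max (pvMX l) a := by
  cases l with
  | nil => exact absurd rfl h
  | cons x t => simp [pvMX, List.foldl_append]

lemma pvSM_cons (x : Int) (t : List Int) (h : t ≠ []) :
    pvSM (x :: t) = min x (pvSM t) := by
  cases t with
  | nil => exact absurd rfl h
  | cons y t' =>
    show (y :: t').foldl min x = min x (t'.foldl min y)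
    rw [List.foldl_cons, List.foldl_assoc]

-- max(items[:k+1]) is the (k+1)-st prefix maximum
lemma pvPM_take (items : List Int) : ∀ k : Nat, k < items.length →
    pvMX (items.take (k + 1)) = pvPM items k := by
  intro k
  induction k with
  | zero =>
    intro h
    rw [List.take_one]
    cases items with
    | nil => simp at h
    | cons x t =>
      show pvMX [x] = PySem.List.pyGetD (x :: t) 0 0
      simp [pvMX, PySem.List.pyGetD, PySem.List.pyGet?, PySem.List.pyIdx?]
  | succ k ih =>
    intro h
    have hk : k < items.length := by omega
    rw [List.take_succ]
    have hget : items[k + 1]? = some items[k + 1] := List.getElem?_eq_getElem h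
    rw [hget]
    simp only [Option.toList_some]
    rw [pvMX_append _ _ (by
      intro he
      have h0 : (items.take (k + 1)).length = 0 := by rw [he]; rfl
      rw [List.length_take] at h0
      omega), ih hk]
    show _ = max (pvPM items k) (PySem.List.pyGetD items ((k : Int) + 1) 0)
    rw [show ((k : Int) + 1) = ((k + 1 : Nat) : Int) by push_cast; ring,
      PySem.List.pyGetD_natCast, List.getD_eq_getElem _ _ h]

-- A's suffix-min fold computes the suffix minima pointwise
lemma pvSufChar (items : List Int) : ∀ (fuel : Nat) (j : Int) (s : List Int),
    j + 1 = (fuel : Int) → j ≤ (items.length : Int) - 2 →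
    s.length = items.length →
    (∀ k : Int, j < k → k < (items.length : Int) →
      PySem.List.pyGetD s k 0 = pvSM (items.drop k.toNat)) →
    ∀ k : Int, 0 ≤ k → k < (items.length : Int) →
      PySem.List.pyGetD ((PySem.List.pyRange j (-1) (-1)).foldl
        (fun s i => PySem.List.pySetD s i
          (min (PySem.List.pyGetD items i 0) (PySem.List.pyGetD s (i + 1) 0))) s) k 0 =
      pvSM (items.drop k.toNat) := by
  intro fuel
  induction fuel with
  | zero =>
    intro j s hj _ _ hinv k hk0 hkn
    have hj' : j = -1 := by omega
    subst hj'
    rw [PySem.List.pyRange_neg_one_eq_nil (by omega), List.foldl_nil]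
    exact hinv k (by omega) hkn
  | succ f ih =>
    intro j s hj hjn hs hinv k hk0 hkn
    have hj0 : 0 ≤ j := by omega
    have hjlt : j + 1 < (items.length : Int) := by omega
    rw [PySem.List.pyRange_neg_one_cons (by omega), List.foldl_cons]
    have hv1 : PySem.List.pyGetD s (j + 1) 0 = pvSM (items.drop (j + 1).toNat) :=
      hinv (j + 1) (by omega) hjlt
    have hjnat : j.toNat < items.length := by omega
    have hdrop : items.drop j.toNat = items[j.toNat] :: items.drop (j.toNat + 1) :=
      List.drop_eq_getElem_cons hjnat
    have hne : items.drop (j.toNat + 1) ≠ [] := by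
      intro he
      have := congrArg List.length he
      simp [List.length_drop] at this
      omega
    have hget : PySem.List.pyGetD items j 0 = items[j.toNat] := by
      conv_lhs => rw [show j = ((j.toNat : Nat) : Int) by omega]
      rw [PySem.List.pyGetD_natCast, List.getD_eq_getElem _ _ hjnat]
    have hval : min (PySem.List.pyGetD items j 0) (PySem.List.pyGetD s (j + 1) 0) =
        pvSM (items.drop j.toNat) := by
      rw [hget, hv1, show (j + 1).toNat = j.toNat + 1 by omega, hdrop, pvSM_cons _ _ hne]
    apply ih (j - 1) _ (by push_cast at hj ⊢; omega) (by omega)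
      (by rw [PySem.List.length_pySetD]; exact hs) _ k hk0 hkn
    intro k' hk1 hk2
    rw [pvGetD_setD s j k' _ hj0 (by omega) (by omega)]
    by_cases h : k' = j
    · rw [if_pos h, h, hval]
    · rw [if_neg h]
      exact hinv k' (by omega) hk2

-- L4: A's enumerate scan with inline best-tracking equals the selection fold
-- over the filtered index range
lemma pvL4 (items : List Int) (hne : items ≠ []) (suf pre : List Int) (n2 : Int)
    (hpre : ∀ k : Nat, k < items.length → PySem.List.pyGetD pre (k : Int) 0 = pvPM items k) :
    ∀ (fuel k : Nat) (best : Int), items.length = k + fuel →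
    ((PySem.List.enumerate (items.drop k) ((k : Int) + 1)).foldl
      (fun (st : Int × Int) p =>
        let big := max st.1 p.2
        let best := if p.1 < (items.length : Int) - 1 ∧ big ≤ PySem.List.pyGetD suf p.1 0 ∧
            |n2 - p.1| < |n2 - st.2| then p.1 else st.2
        (big, best))
      (pvBG items k, best)).2 =
    ((PySem.List.pyRange ((k : Int) + 1) ((items.length : Int) - 1) 1).filter
        (fun i => decide (PySem.List.pyGetD pre (i - 1) 0 ≤ PySem.List.pyGetD suf i 0))).foldl
      (fun b i => if |n2 - i| < |n2 - b| then i else b) best := by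
  intro fuel
  induction fuel with
  | zero =>
    intro k best hk
    rw [List.drop_of_length_le (by omega), PySem.List.pyRange_one_eq_nil (by omega)]
    rfl
  | succ f ih =>
    intro k best hk
    have hklt : k < items.length := by omega
    rw [List.drop_eq_getElem_cons hklt, PySem.List.enumerate_cons, List.foldl_cons]
    have hgetk : items[k] = PySem.List.pyGetD items (k : Int) 0 := by
      rw [PySem.List.pyGetD_natCast, List.getD_eq_getElem _ _ hklt]
    have hbig : max (pvBG items k) items[k] = pvPM items k := by
      cases k with
      | zero =>
        obtain ⟨m, hm⟩ := Option.ne_none_iff_exists'.mp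
          ((PySem.List.min?_eq_none_iff items (fun x => x)).ne.mpr hne)
        have hle : m ≤ items[0] :=
          PySem.List.min?_isMin hm items[0] (List.getElem_mem _)
        rw [show pvBG items 0 = (PySem.List.min? items (fun x => x)).getD 0 - 1 from rfl, hm]
        simp only [Option.getD_some]
        rw [max_eq_right (by omega), hgetk]
        rfl
      | succ r =>
        rw [show pvBG items (r + 1) = pvPM items r from rfl, hgetk,
          show pvPM items (r + 1) = max (pvPM items r)
            (PySem.List.pyGetD items ((r : Int) + 1) 0) from rfl]
        norm_cast
    simp only [hbig]
    have hcondeq : (pvPM items k ≤ PySem.List.pyGetD suf ((k : Int) + 1) 0) =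
        (PySem.List.pyGetD pre ((k : Int) + 1 - 1) 0 ≤ PySem.List.pyGetD suf ((k : Int) + 1) 0) := by
      rw [show (k : Int) + 1 - 1 = (k : Int) by ring, hpre k hklt]
    by_cases hlt : (k : Int) + 1 < (items.length : Int) - 1
    · rw [PySem.List.pyRange_one_cons hlt, show (k : Int) + 1 + 1 = ((k + 1 : Nat) : Int) + 1
        by push_cast; ring]
      by_cases hc : PySem.List.pyGetD pre ((k : Int) + 1 - 1) 0 ≤ PySem.List.pyGetD suf ((k : Int) + 1) 0
      · rw [List.filter_cons_of_pos (by simpa using hc), List.foldl_cons]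
        by_cases hsel : |n2 - ((k : Int) + 1)| < |n2 - best|
        · rw [if_pos ⟨hlt, by rw [hcondeq]; exact hc, hsel⟩, if_pos hsel]
          exact ih (k + 1) ((k : Int) + 1) (by omega)
        · rw [if_neg (by intro h; exact hsel h.2.2), if_neg hsel]
          exact ih (k + 1) best (by omega)
      · rw [List.filter_cons_of_neg (by simpa using hc),
          if_neg (by intro h; exact hc (hcondeq ▸ h.2.1))]
        exact ih (k + 1) best (by omega)
    · rw [PySem.List.pyRange_one_eq_nil (by omega),
        if_neg (by intro h; exact hlt h.1)]
      have htail := ih (k + 1) best (by omega)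
      rw [PySem.List.pyRange_one_eq_nil (by omega)] at htail
      exact htail

-- L5a: min? of a list with an explicit head is A's selection fold from that head
lemma pvL5a (key : Int → Int) : ∀ (l : List Int) (m : Int),
    PySem.List.min? (m :: l) key =
    some (l.foldl (fun b i => if key i < key b then i else b) m) := by
  intro l
  induction l with
  | nil => intro m; rfl
  | cons x t ih =>
    intro m
    have h1 : PySem.List.min? (m :: x :: t) key =
        PySem.List.min? ((if key x < key m then x else m) :: t) key := by
      simp only [PySem.List.min?, List.foldl_cons]
      by_cases h : key x < key m <;> simp [h]
    rw [h1, ih]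
    simp only [List.foldl_cons]

-- L5: min-by-key with a beatable base equals A's selection fold
lemma pvL5 (key : Int → Int) (l : List Int) (b : Int) (h : ∀ i ∈ l, key i < key b) :
    l.foldl (fun b i => if key i < key b then i else b) b =
    (match PySem.List.min? l key with | some m => m | none => b) := by
  cases l with
  | nil => rfl
  | cons x t =>
    have hx : key x < key b := h x (List.mem_cons_self)
    rw [pvL5a key t x]
    simp [List.foldl_cons, if_pos hx]

-- the selection fold on a strictly increasing list returns the smallest element of minimal key
lemma pvPick (key : Int → Int) : ∀ (t : List Int) (x m : Int), (x :: t).Pairwise (· < ·) →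
    m ∈ x :: t → (∀ j ∈ x :: t, key m ≤ key j) → (∀ j ∈ x :: t, key j = key m → m ≤ j) →
    t.foldl (fun b i => if key i < key b then i else b) x = m := by
  intro t
  induction t with
  | nil =>
    intro x m _ hm _ _
    have : m = x := by simpa using hm
    exact this.symm
  | cons y t' ih =>
    intro x m hp hm hmin hfst
    have hxy : x < y := (List.pairwise_cons.mp hp).1 y List.mem_cons_self
    rw [List.foldl_cons]
    by_cases hk : key y < key x
    · rw [if_pos hk]
      have hmx : m ≠ x := by
        intro he
        subst he
        exact absurd (hmin y (by simp)) (not_le.mpr hk)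
      have hm' : m ∈ y :: t' := by
        rcases List.mem_cons.mp hm with h | h
        · exact absurd h hmx
        · exact h
      exact ih y m (List.pairwise_cons.mp hp).2 hm'
        (fun j hj => hmin j (List.mem_cons_of_mem x hj))
        (fun j hj hje => hfst j (List.mem_cons_of_mem x hj) hje)
    · rw [if_neg hk]
      have hxle : key x ≤ key y := not_lt.mp hk
      have hp' : (x :: t').Pairwise (· < ·) := by
        rcases List.pairwise_cons.mp hp with ⟨h1, h2⟩
        rcases List.pairwise_cons.mp h2 with ⟨h3, h4⟩
        exact List.pairwise_cons.mpr ⟨fun z hz => lt_trans hxy (h3 z hz), h4⟩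
      have hmy : m ≠ y := by
        intro he
        subst he
        have hkx : key x = key m := le_antisymm (le_trans hxle (le_of_eq rfl)) (hmin x (by simp))
        have := hfst x (by simp) hkx
        omega
      have hm' : m ∈ x :: t' := by
        rcases List.mem_cons.mp hm with h | h
        · exact List.mem_cons.mpr (Or.inl h)
        · rcases List.mem_cons.mp h with h2 | h2
          · exact absurd h2 hmy
          · exact List.mem_cons_of_mem x h2
      have hsub : ∀ j ∈ x :: t', j ∈ x :: y :: t' := by
        intro j hj
        rcases List.mem_cons.mp hj with h | h
        · exact List.mem_cons.mpr (Or.inl h)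
        · exact List.mem_cons_of_mem x (List.mem_cons_of_mem y h)
      exact ih x m hp' hm' (fun j hj => hmin j (hsub j hj))
        (fun j hj hje => hfst j (hsub j hj) hje)

-- min? on a strictly increasing list is the smallest element of minimal key
lemma pvMinChar (key : Int → Int) (l : List Int) (hp : l.Pairwise (· < ·)) (m : Int)
    (hm : m ∈ l) (hmin : ∀ j ∈ l, key m ≤ key j) (hfst : ∀ j ∈ l, key j = key m → m ≤ j) :
    PySem.List.min? l key = some m := by
  cases l with
  | nil => simp at hm
  | cons x t =>
    rw [pvL5a key t x, pvPick key t x m hp hm hmin hfst]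

-- the candidate test implies the bounds
lemma pvCheckBounds (items : List Int) (n i : Int) (h : pvAltCheck items n i = true) :
    1 ≤ i ∧ i ≤ n - 2 := by
  unfold pvAltCheck at h
  split_ifs at h with hb
  exact hb

-- with no valid candidate at distance ≥ d ≥ n, the valid list is empty
lemma pvBdone (items : List Int) (n n2 d : Int) (hn2 : 0 ≤ n2 ∧ n2 ≤ n) (hd : n ≤ d)
    (hinv : ∀ i : Int, pvAltCheck items n i = true → d ≤ |n2 - i|) :
    (PySem.List.pyRange 1 (n - 1) 1).filter (pvAltCheck items n) = [] := by
  rw [List.filter_eq_nil_iff]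
  intro i _ hc
  obtain ⟨h1, h2⟩ := pvCheckBounds items n i hc
  have := hinv i hc
  rcases abs_cases (n2 - i) with ⟨he, _⟩ | ⟨he, _⟩ <;> omega

-- B's outward search returns the first minimal-distance valid index
lemma pvBgo (items : List Int) (n n2 : Int) (hn2 : 0 ≤ n2 ∧ n2 ≤ n) :
    ∀ (fuel : Nat) (d : Int), 0 ≤ d → n ≤ d + (fuel : Int) →
    (∀ i : Int, pvAltCheck items n i = true → d ≤ |n2 - i|) →
    pvAltGo items n n2 (PySem.List.pyRange d n 1) =
    (match PySem.List.min? ((PySem.List.pyRange 1 (n - 1) 1).filter (pvAltCheck items n))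
        (fun i => |n2 - i|) with
     | some m => m | none => -1) := by
  intro fuel
  induction fuel with
  | zero =>
    intro d hd0 hdn hinv
    rw [PySem.List.pyRange_one_eq_nil (by omega), pvBdone items n n2 d hn2 (by omega) hinv]
    rfl
  | succ f ih =>
    intro d hd0 hdn hinv
    by_cases hd : n ≤ d
    · rw [PySem.List.pyRange_one_eq_nil (by omega), pvBdone items n n2 d hn2 hd hinv]
      rfl
    rw [PySem.List.pyRange_one_cons (by omega)]
    show (match (if d = 0 then [n2] else [n2 - d, n2 + d]).find? (pvAltCheck items n) with
      | some i => i
      | none => pvAltGo items n n2 (PySem.List.pyRange (d + 1) n 1)) = _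
    have hVp : ((PySem.List.pyRange 1 (n - 1) 1).filter (pvAltCheck items n)).Pairwise (· < ·) :=
      List.Pairwise.filter _ (PySem.List.pairwise_lt_pyRange_one 1 (n - 1))
    have hmemV : ∀ i : Int, pvAltCheck items n i = true →
        i ∈ (PySem.List.pyRange 1 (n - 1) 1).filter (pvAltCheck items n) := by
      intro i hc
      obtain ⟨h1, h2⟩ := pvCheckBounds items n i hc
      exact List.mem_filter.mpr ⟨PySem.List.mem_pyRange_one.mpr ⟨h1, by omega⟩, hc⟩
    have hkeyV : ∀ j ∈ (PySem.List.pyRange 1 (n - 1) 1).filter (pvAltCheck items n),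
        d ≤ |n2 - j| := by
      intro j hj
      exact hinv j (List.mem_filter.mp hj).2
    by_cases hdz : d = 0
    · subst hdz
      rw [if_pos rfl]
      by_cases hc : pvAltCheck items n n2 = true
      · rw [List.find?_cons_of_pos (p := pvAltCheck items n) hc]
        have : PySem.List.min? ((PySem.List.pyRange 1 (n - 1) 1).filter (pvAltCheck items n))
            (fun i => |n2 - i|) = some n2 := by
          apply pvMinChar _ _ hVp n2 (hmemV n2 hc)
          · intro j _
            simp only [sub_self, abs_zero]
            positivity
          · intro j hj hje
            simp only [sub_self, abs_zero] at hje
            have : n2 - j = 0 := abs_eq_zero.mp hje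
            omega
        rw [this]
      · rw [List.find?_cons_of_neg (p := pvAltCheck items n) (by simpa using hc), List.find?_nil]
        apply ih (0 + 1) (by omega) (by omega)
        intro i hci
        have h0 := hinv i hci
        by_cases hii : i = n2
        · subst hii; exact absurd hci hc
        · rcases abs_cases (n2 - i) with ⟨he, _⟩ | ⟨he, _⟩ <;> omega
    · rw [if_neg hdz]
      by_cases hc1 : pvAltCheck items n (n2 - d) = true
      · rw [List.find?_cons_of_pos (p := pvAltCheck items n) hc1]
        have : PySem.List.min? ((PySem.List.pyRange 1 (n - 1) 1).filter (pvAltCheck items n))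
            (fun i => |n2 - i|) = some (n2 - d) := by
          apply pvMinChar _ _ hVp _ (hmemV _ hc1)
          · intro j hj
            have : |n2 - (n2 - d)| = d := by
              rw [show n2 - (n2 - d) = d by ring, abs_of_nonneg hd0]
            rw [this]
            exact hkeyV j hj
          · intro j _ hje
            have hkd : |n2 - (n2 - d)| = d := by
              rw [show n2 - (n2 - d) = d by ring, abs_of_nonneg hd0]
            rw [hkd] at hje
            rcases abs_cases (n2 - j) with ⟨he, _⟩ | ⟨he, _⟩ <;> omega
        rw [this]
      · rw [List.find?_cons_of_neg (p := pvAltCheck items n) (by simpa using hc1)]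
        by_cases hc2 : pvAltCheck items n (n2 + d) = true
        · rw [List.find?_cons_of_pos (p := pvAltCheck items n) hc2]
          have : PySem.List.min? ((PySem.List.pyRange 1 (n - 1) 1).filter (pvAltCheck items n))
              (fun i => |n2 - i|) = some (n2 + d) := by
            apply pvMinChar _ _ hVp _ (hmemV _ hc2)
            · intro j hj
              have : |n2 - (n2 + d)| = d := by
                rw [show n2 - (n2 + d) = -d by ring, abs_neg, abs_of_nonneg hd0]
              rw [this]
              exact hkeyV j hj
            · intro j hj hje
              have hkd : |n2 - (n2 + d)| = d := by
                rw [show n2 - (n2 + d) = -d by ring, abs_neg, abs_of_nonneg hd0]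
              rw [hkd] at hje
              have hcj := (List.mem_filter.mp hj).2
              by_cases hjl : j = n2 - d
              · subst hjl; exact absurd hcj hc1
              · rcases abs_cases (n2 - j) with ⟨he, _⟩ | ⟨he, _⟩ <;> omega
          rw [this]
        · rw [List.find?_cons_of_neg (p := pvAltCheck items n) (by simpa using hc2), List.find?_nil]
          apply ih (d + 1) (by omega) (by omega)
          intro i hci
          have h0 := hinv i hci
          by_cases hil : i = n2 - d
          · subst hil; exact absurd hci hc1
          by_cases hir : i = n2 + d
          · subst hir; exact absurd hci hc2
          rcases abs_cases (n2 - i) with ⟨he, _⟩ | ⟨he, _⟩ <;> omega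

-- ===== VERDICT (by name: the statement is the Claim_ definition above) =====
theorem partition_point_spec : Claim_equal_partition_point := by
  intro items _ hpre
  have hne : items ≠ [] := hpre
  have hl0 : 0 < items.length := List.length_pos_iff.mpr hne
  simp only [Spec_partition_point, partition_point, partition_point_alt]
  set n2 : Int := PySem.Int.floordiv (↑items.length) 2 with hn2def
  have hn2 : 0 ≤ n2 ∧ n2 ≤ (items.length : Int) := by
    rw [hn2def, PySem.Int.floordiv_eq_ediv_of_pos (by omega)]
    omega
  set S : List Int := PySem.List.pySetD
      (List.map (fun _ => (0 : Int)) (PySem.List.pyRange 0 (↑items.length) 1))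
      ((items.length : Int) - 1) (PySem.List.pyGetD items ((items.length : Int) - 1) 0) with hS
  have hSlen : S.length = items.length := by
    rw [hS, PySem.List.length_pySetD, List.length_map, PySem.List.length_pyRange_one]
    omega
  have hlast : items.drop (items.length - 1) = [items[items.length - 1]] := by
    rw [List.drop_eq_getElem_cons (by omega)]
    congr 1
    rw [show items.length - 1 + 1 = items.length by omega, List.drop_length]
  have hM := pvSufChar items (items.length - 1) ((items.length : Int) - 2) S
    (by omega) (by omega) hSlen
    (fun k h1 h2 => by
      have hk : k = (items.length : Int) - 1 := by omega
      subst hk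
      rw [hS, pvGetD_setD _ _ _ _ (by omega)
        (by rw [List.length_map, PySem.List.length_pyRange_one]; omega) (by omega), if_pos rfl]
      rw [show ((items.length : Int) - 1) = ((items.length - 1 : Nat) : Int) by omega,
        PySem.List.pyGetD_natCast, List.getD_eq_getElem _ _ (by omega), Int.toNat_natCast, hlast]
      rfl)
  set pre : List Int := (List.range items.length).map (fun k => pvPM items k) with hpreDef
  have hpre : ∀ k : Nat, k < items.length →
      PySem.List.pyGetD pre (k : Int) 0 = pvPM items k := by
    intro k hk
    rw [PySem.List.pyGetD_natCast, hpreDef,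
      List.getD_eq_getElem _ _ (by simp [hk]), List.getElem_map, List.getElem_range]
  have h4 := pvL4 items hne
    ((PySem.List.pyRange ((items.length : Int) - 2) (-1) (-1)).foldl
      (fun s i => PySem.List.pySetD s i
        (min (PySem.List.pyGetD items i 0) (PySem.List.pyGetD s (i + 1) 0))) S)
    pre n2 hpre items.length 0 (-1) (by omega)
  simp only [List.drop_zero, Nat.cast_zero, zero_add, pvBG] at h4
  rw [h4]
  have hfc : ((PySem.List.pyRange 1 ((items.length : Int) - 1) 1).filter
      (fun i => decide (PySem.List.pyGetD pre (i - 1) 0 ≤ PySem.List.pyGetD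
        ((PySem.List.pyRange ((items.length : Int) - 2) (-1) (-1)).foldl
          (fun s i => PySem.List.pySetD s i
            (min (PySem.List.pyGetD items i 0) (PySem.List.pyGetD s (i + 1) 0))) S) i 0))) =
      ((PySem.List.pyRange 1 ((items.length : Int) - 1) 1).filter
        (pvAltCheck items (items.length : Int))) := by
    apply List.filter_congr
    intro i hi
    obtain ⟨h1, h2⟩ := PySem.List.mem_pyRange_one.mp hi
    have hi2 : i ≤ (items.length : Int) - 2 := by omega
    unfold pvAltCheck
    rw [if_pos ⟨h1, hi2⟩]
    rw [PySem.List.slice_to items (b := i) (by omega), PySem.List.slice_from items (a := i) (by omega)]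
    rw [pvMX_eq_max?, pvSM_eq_min?]
    have ht := pvPM_take items (i.toNat - 1) (by omega)
    rw [show i.toNat - 1 + 1 = i.toNat by omega] at ht
    rw [ht]
    rw [show i - 1 = ((i.toNat - 1 : Nat) : Int) by omega, hpre (i.toNat - 1) (by omega),
      hM i (by omega) (by omega)]
  rw [hfc, pvL5]
  · exact (pvBgo items (↑items.length) n2 hn2 items.length 0 (by omega) (by omega)
      (fun i _ => abs_nonneg _)).symm
  · intro i hi
    obtain ⟨h1, h2⟩ := PySem.List.mem_pyRange_one.mp (List.mem_filter.mp hi).1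
    rw [hn2def, PySem.Int.floordiv_eq_ediv_of_pos (by omega)]
    rcases abs_cases ((items.length : Int) / 2 - i) with ⟨he, _⟩ | ⟨he, _⟩ <;>
      rcases abs_cases ((items.length : Int) / 2 - (-1)) with ⟨hf, _⟩ | ⟨hf, _⟩ <;> omega
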